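-- pv_equiv track=rewrite | github.com/curio184/kaitou_kid | src/embedding.py | _group_sentences_by_token_count
-- ===== SOURCE A (Python) =====
-- from typing import List
--
-- def _group_sentences_by_token_count(
--
--     sentences: List[str],
--     sentence_token_counts: List[int],
--     max_token_count_per_group: int
-- ) -> List[List[str]]:
--     """
--     1グループあたりの最大トークン数を超えないように、文をグルーピングする。
--
--     Parameters
--     ----------
--     sentences : List[str]
--         文のリスト
--     sentence_token_counts : List[int]
--         文のトークン数のリスト
--     max_group_token_count : int
--         1グループあたりの最大トークン数
--
--     Returns
--     -------
--     List[List[str]]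
--         グルーピングした文のリスト
--     """
--
--     groups = []
--     current_group_token_count = 0
--     current_group = []
--
--     for sentence, token_count in zip(sentences, sentence_token_counts):
--         if current_group_token_count + token_count <= max_token_count_per_group:
--             current_group_token_count += token_count
--             current_group.append(sentence)
--         else:
--             if current_group:
--                 groups.append(current_group)
--             current_group = [sentence]
--             current_group_token_count = token_count
--
--     if current_group:
--         groups.append(current_group)
--
--     return groups
-- ===== SOURCE B (Python) =====
-- from typing import List
--
--
-- def _group_sentences_by_token_count(
--     sentences: List[str],
--     sentence_token_counts: List[int],
--     max_token_count_per_group: int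
-- ) -> List[List[str]]:
--     counts = sentence_token_counts[:len(sentences)]
--     # pass 1: compute only the size (number of sentences) of each group
--     sizes = []
--     running = 0
--     size = 0
--     for c in counts:
--         if size > 0 and running + c > max_token_count_per_group:
--             sizes.append(size)
--             size = 0
--             running = 0
--         running += c
--         size += 1
--     if size > 0:
--         sizes.append(size)
--     # pass 2: slice the sentence list by the group sizes
--     groups = []
--     pos = 0
--     for k in sizes:
--         groups.append(sentences[pos:pos + k])
--         pos += k
--     return groups
-- ===== Notes on version B (the rewrite author's own statement) =====
-- stated objective: alternative
-- what changed: Replaces A's single loop that grows a current-group list inline with a two-pass scheme: a first pass computes only the size of each group from the token counts, and a second pass slices the sentence list by those sizes.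
import Mathlib
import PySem

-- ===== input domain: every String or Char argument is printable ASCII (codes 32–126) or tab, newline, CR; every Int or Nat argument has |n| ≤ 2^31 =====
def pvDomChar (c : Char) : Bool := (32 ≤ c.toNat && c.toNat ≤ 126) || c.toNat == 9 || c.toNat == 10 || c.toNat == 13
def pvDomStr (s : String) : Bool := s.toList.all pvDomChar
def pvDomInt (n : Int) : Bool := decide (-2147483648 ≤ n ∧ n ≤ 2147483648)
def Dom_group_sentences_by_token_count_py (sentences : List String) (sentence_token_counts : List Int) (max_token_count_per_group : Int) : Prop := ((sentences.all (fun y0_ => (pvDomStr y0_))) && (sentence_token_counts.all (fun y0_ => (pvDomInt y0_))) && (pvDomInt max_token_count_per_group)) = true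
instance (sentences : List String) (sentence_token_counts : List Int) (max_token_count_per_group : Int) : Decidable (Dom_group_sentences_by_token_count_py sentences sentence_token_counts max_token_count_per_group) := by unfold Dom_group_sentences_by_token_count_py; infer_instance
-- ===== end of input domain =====

-- B replaces A's inline group-growing loop by a pass that computes only group sizes plus a slicing pass (alternative decomposition, same cost).

-- ===== PORT A =====
-- the loop body of A: state = (groups, current_group_token_count, current_group)
def pvStepA (mx : Int) (st : List (List String) × Int × List String) (p : String × Int) :
    List (List String) × Int × List String :=
  if st.2.1 + p.2 ≤ mx then
    (st.1, st.2.1 + p.2, st.2.2 ++ [p.1])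
  else
    ((if st.2.2 = [] then st.1 else st.1 ++ [st.2.2]), p.2, [p.1])

def group_sentences_by_token_count_py (sentences : List String) (sentence_token_counts : List Int) (max_token_count_per_group : Int) : List (List String) :=
  let fin := (sentences.zip sentence_token_counts).foldl (pvStepA max_token_count_per_group) ([], 0, [])
  if fin.2.2 = [] then fin.1 else fin.1 ++ [fin.2.2]

-- ===== PORT B =====
-- loop body of B's pass 1: state = (sizes, running, size); `if size > 0 and running + c > max: close group` then `running += c; size += 1`
def pvStep1 (mx : Int) (st : List Nat × Int × Nat) (c : Int) : List Nat × Int × Nat :=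
  if 0 < st.2.2 ∧ mx < st.2.1 + c then
    (st.1 ++ [st.2.2], 0 + c, 0 + 1)
  else
    (st.1, st.2.1 + c, st.2.2 + 1)

-- loop body of B's pass 2: state = (groups, pos); appends sentences[pos:pos+k]
def pvStep2 (sentences : List String) (st : List (List String) × Int) (k : Nat) : List (List String) × Int :=
  (st.1 ++ [PySem.List.slice sentences (some st.2) (some (st.2 + (k : Int)))], st.2 + (k : Int))

def group_sentences_by_token_count_py_alt (sentences : List String) (sentence_token_counts : List Int) (max_token_count_per_group : Int) : List (List String) :=
  -- counts = sentence_token_counts[:len(sentences)]  (len ≥ 0, so the slice is `take`)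
  let counts := sentence_token_counts.take sentences.length
  let fin1 := counts.foldl (pvStep1 max_token_count_per_group) ([], 0, 0)
  let sizes := if 0 < fin1.2.2 then fin1.1 ++ [fin1.2.2] else fin1.1
  (sizes.foldl (pvStep2 sentences) ([], 0)).1

-- ===== PRECONDITION & SPEC =====
def Spec_group_sentences_by_token_count_py (sentences : List String) (sentence_token_counts : List Int) (max_token_count_per_group : Int) (out : List (List String)) : Prop := out = group_sentences_by_token_count_py_alt sentences sentence_token_counts max_token_count_per_group
instance (sentences : List String) (sentence_token_counts : List Int) (max_token_count_per_group : Int) (out : List (List String)) : Decidable (Spec_group_sentences_by_token_count_py sentences sentence_token_counts max_token_count_per_group out) := by unfold Spec_group_sentences_by_token_count_py; infer_instance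

-- ===== CLAIM (what is proved, stated in full; the proofs are below) =====
def Claim_equal_group_sentences_by_token_count_py : Prop := ∀ (sentences : List String) (sentence_token_counts : List Int) (max_token_count_per_group : Int), Dom_group_sentences_by_token_count_py sentences sentence_token_counts max_token_count_per_group → Spec_group_sentences_by_token_count_py sentences sentence_token_counts max_token_count_per_group (group_sentences_by_token_count_py sentences sentence_token_counts max_token_count_per_group)

-- ===== LEMMAS AND PROOFS =====

-- number of further counts that still fit in a group whose running sum is `running`
def pvFirstSize (mx running : Int) (rest : List Int) : Nat :=
  match rest with
  | [] => 0
  | c :: r => if running + c > mx then 0 else pvFirstSize mx (running + c) r + 1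

-- the list of group sizes, one group at a time
def pvSizesRec (mx : Int) (counts : List Int) : List Nat :=
  match counts with
  | [] => []
  | c :: r => (pvFirstSize mx c r + 1) :: pvSizesRec mx (r.drop (pvFirstSize mx c r))
termination_by counts.length
decreasing_by simp

-- splitting a list by a list of sizes
def pvSplitRec (ss : List String) (sizes : List Nat) : List (List String) :=
  match sizes with
  | [] => []
  | k :: rest => ss.take k :: pvSplitRec (ss.drop k) rest

-- "continuation" form of A's loop once the current group is nonempty
def pvContA (mx : Int) (cur : List String) (run : Int) (ps : List (String × Int)) : List (List String) :=
  match ps with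
  | [] => [cur]
  | (s, c) :: r => if run + c ≤ mx then pvContA mx (cur ++ [s]) (run + c) r else cur :: pvContA mx [s] c r

-- "continuation" form of B's pass-1 loop once the current group is nonempty
def pvContS (mx run : Int) (size : Nat) (cs : List Int) : List Nat :=
  match cs with
  | [] => [size]
  | c :: r => if run + c ≤ mx then pvContS mx (run + c) (size + 1) r else size :: pvContS mx c 1 r

theorem pvSizesRec_nil (mx : Int) : pvSizesRec mx [] = [] := by
  rw [pvSizesRec.eq_def]

theorem pvSizesRec_cons (mx c : Int) (r : List Int) :
    pvSizesRec mx (c :: r) = (pvFirstSize mx c r + 1) :: pvSizesRec mx (r.drop (pvFirstSize mx c r)) := by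
  rw [pvSizesRec.eq_def]

-- A's fold, started on a nonempty current group, computes pvContA
theorem foldA_eq_contA (mx : Int) (ps : List (String × Int)) :
    ∀ gs run cur, cur ≠ [] →
    (let fin := ps.foldl (pvStepA mx) (gs, run, cur)
     if fin.2.2 = [] then fin.1 else fin.1 ++ [fin.2.2]) = gs ++ pvContA mx cur run ps := by
  induction ps with
  | nil => intro gs run cur h; simp [pvContA, h]
  | cons p r ih =>
      intro gs run cur h
      obtain ⟨s, c⟩ := p
      by_cases hc : run + c ≤ mx
      · have : pvStepA mx (gs, run, cur) (s, c) = (gs, run + c, cur ++ [s]) := by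
          simp [pvStepA, hc]
        simp only [List.foldl_cons, this, pvContA, if_pos hc]
        exact ih gs (run + c) (cur ++ [s]) (by simp)
      · have : pvStepA mx (gs, run, cur) (s, c) = (gs ++ [cur], c, [s]) := by
          simp [pvStepA, h]; omega
        simp only [List.foldl_cons, this, pvContA, if_neg hc]
        rw [ih (gs ++ [cur]) c [s] (by simp)]
        simp

-- A in closed form
theorem A_eq (sentences : List String) (counts : List Int) (mx : Int) :
    group_sentences_by_token_count_py sentences counts mx =
      match sentences.zip counts with
      | [] => []
      | (s0, c0) :: r => pvContA mx [s0] c0 r := by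
  unfold group_sentences_by_token_count_py
  cases hz : sentences.zip counts with
  | nil => simp
  | cons p r =>
      obtain ⟨s0, c0⟩ := p
      have hstep : pvStepA mx ([], 0, []) (s0, c0) = ([], c0, [s0]) := by
        by_cases hc : (0 : Int) + c0 ≤ mx <;> simp [pvStepA, *]
      simp only [List.foldl_cons, hstep]
      exact foldA_eq_contA mx r [] c0 [s0] (by simp)

-- B's pass-1 fold, started on a nonempty current group, computes pvContS
theorem fold1_eq_contS (mx : Int) (cs : List Int) :
    ∀ (acc : List Nat) (run : Int) (size : Nat), size ≠ 0 →
    (let fin := cs.foldl (pvStep1 mx) (acc, run, size)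
     if 0 < fin.2.2 then fin.1 ++ [fin.2.2] else fin.1) = acc ++ pvContS mx run size cs := by
  induction cs with
  | nil => intro acc run size h; simp [pvContS]; omega
  | cons c r ih =>
      intro acc run size h
      by_cases hc : run + c ≤ mx
      · have : pvStep1 mx (acc, run, size) c = (acc, run + c, size + 1) := by
          simp [pvStep1]; omega
        simp only [List.foldl_cons, this, pvContS, if_pos hc]
        exact ih acc (run + c) (size + 1) (by omega)
      · have : pvStep1 mx (acc, run, size) c = (acc ++ [size], 0 + c, 0 + 1) := by
          simp [pvStep1]; omega
        simp only [List.foldl_cons, this, pvContS, if_neg hc]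
        rw [ih (acc ++ [size]) (0 + c) (0 + 1) (by omega)]
        simp

-- pvContS is the first group size followed by the remaining sizes
theorem contS_eq_sizes (mx : Int) (cs : List Int) :
    ∀ (run : Int) (size : Nat),
    pvContS mx run size cs =
      (size + pvFirstSize mx run cs) :: pvSizesRec mx (cs.drop (pvFirstSize mx run cs)) := by
  induction cs with
  | nil => intro run size; simp [pvContS, pvFirstSize, pvSizesRec_nil]
  | cons c r ih =>
      intro run size
      by_cases hc : run + c ≤ mx
      · have hfs : pvFirstSize mx run (c :: r) = pvFirstSize mx (run + c) r + 1 := by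
          simp [pvFirstSize]; omega
        simp only [pvContS, if_pos hc, hfs, ih (run + c) (size + 1), List.drop_succ_cons]
        congr 1
        omega
      · have hfs : pvFirstSize mx run (c :: r) = 0 := by
          simp [pvFirstSize]; omega
        simp only [pvContS, if_neg hc, hfs, List.drop_zero, Nat.add_zero, pvSizesRec_cons,
          ih c 1]
        congr 2
        omega

-- B's pass 1 computes exactly pvSizesRec
theorem pass1_eq_sizesRec (mx : Int) (counts : List Int) :
    (if 0 < (counts.foldl (pvStep1 mx) ([], 0, 0)).2.2
     then (counts.foldl (pvStep1 mx) ([], 0, 0)).1 ++ [(counts.foldl (pvStep1 mx) ([], 0, 0)).2.2]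
     else (counts.foldl (pvStep1 mx) ([], 0, 0)).1) = pvSizesRec mx counts := by
  cases counts with
  | nil => simp [pvSizesRec_nil]
  | cons c r =>
      have hstep : pvStep1 mx ([], 0, 0) c = ([], c, 1) := by
        simp [pvStep1]
      simp only [List.foldl_cons, hstep]
      rw [fold1_eq_contS mx r [] c 1 (by omega), contS_eq_sizes mx r c 1, pvSizesRec_cons]
      simp
      omega

-- B's pass-2 fold splits the suffix of the sentence list by the sizes
theorem fold2_eq_splitRec (sentences : List String) (sizes : List Nat) :
    ∀ (acc : List (List String)) (pos : Nat),
    (sizes.foldl (pvStep2 sentences) (acc, (pos : Int))).1 =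
      acc ++ pvSplitRec (sentences.drop pos) sizes := by
  induction sizes with
  | nil => intro acc pos; simp [pvSplitRec]
  | cons k rest ih =>
      intro acc pos
      have hstep : pvStep2 sentences (acc, (pos : Int)) k =
          (acc ++ [(sentences.drop pos).take k], ((pos + k : Nat) : Int)) := by
        simp [pvStep2, PySem.List.slice_natCast_add]
      simp only [List.foldl_cons, hstep, ih (acc ++ [(sentences.drop pos).take k]) (pos + k)]
      simp [pvSplitRec, List.drop_drop, Nat.add_comm]

-- B's pass-2 fold from the start position 0
theorem fold2_zero (sentences : List String) (sizes : List Nat) :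
    (sizes.foldl (pvStep2 sentences) ([], 0)).1 = pvSplitRec sentences sizes := by
  have h := fold2_eq_splitRec sentences sizes [] 0
  simpa using h

-- B in closed form
theorem B_eq (sentences : List String) (counts : List Int) (mx : Int) :
    group_sentences_by_token_count_py_alt sentences counts mx =
      pvSplitRec sentences (pvSizesRec mx (counts.take sentences.length)) := by
  unfold group_sentences_by_token_count_py_alt
  rw [fold2_zero, pass1_eq_sizesRec mx (counts.take sentences.length)]

-- zip truncates the second list
theorem zip_take_len (sr : List String) (cr : List Int) :
    sr.zip (cr.take sr.length) = sr.zip cr := by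
  induction sr generalizing cr with
  | nil => simp
  | cons s sr ih => cases cr <;> simp [ih]

-- pvContA peels off exactly the first group delimited by pvFirstSize
theorem contA_first (mx : Int) (cr : List Int) :
    ∀ (run : Int) (cur : List String) (sr : List String), cr.length ≤ sr.length →
    pvContA mx cur run (sr.zip cr) =
      (cur ++ sr.take (pvFirstSize mx run cr)) ::
        (match cr.drop (pvFirstSize mx run cr), sr.drop (pvFirstSize mx run cr) with
         | c' :: cr', s' :: sr' => pvContA mx [s'] c' (sr'.zip cr')
         | _, _ => []) := by
  induction cr with
  | nil => intro run cur sr _; simp [pvContA, pvFirstSize]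
  | cons c cr' ih =>
      intro run cur sr hlen
      cases sr with
      | nil => simp at hlen
      | cons s sr' =>
        simp only [List.zip_cons_cons, pvContA]
        by_cases hc : run + c ≤ mx
        · have hfs : pvFirstSize mx run (c :: cr') = pvFirstSize mx (run + c) cr' + 1 := by
            simp [pvFirstSize]; omega
          rw [if_pos hc, ih (run + c) (cur ++ [s]) sr' (by simpa using hlen), hfs]
          simp
        · have hfs : pvFirstSize mx run (c :: cr') = 0 := by
            simp [pvFirstSize]; omega
          rw [if_neg hc, hfs]
          simp

-- splitting by the group sizes computes pvContA
theorem split_sizes_eq_contA (mx : Int) (n : Nat) :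
    ∀ (cr : List Int) (sr : List String) (s0 : String) (c0 : Int),
    cr.length ≤ n → cr.length ≤ sr.length →
    pvSplitRec (s0 :: sr) (pvSizesRec mx (c0 :: cr)) = pvContA mx [s0] c0 (sr.zip cr) := by
  induction n with
  | zero =>
      intro cr sr s0 c0 hn _
      have : cr = [] := List.length_eq_zero_iff.mp (Nat.le_zero.mp hn)
      subst this
      rw [pvSizesRec_cons]
      simp [pvFirstSize, pvSplitRec, pvSizesRec_nil, pvContA]
  | succ n ih =>
      intro cr sr s0 c0 hn hlen
      rw [contA_first mx cr c0 [s0] sr hlen]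
      set t := pvFirstSize mx c0 cr with ht
      rw [pvSizesRec_cons]
      simp only [pvSplitRec, ← ht]
      have h1 : (s0 :: sr).take (t + 1) = s0 :: sr.take t := by simp
      have h2 : (s0 :: sr).drop (t + 1) = sr.drop t := by simp
      rw [h1, h2]
      cases hcd : cr.drop t with
      | nil => simp [pvSizesRec_nil, pvSplitRec]
      | cons c' cr'' =>
          have htlt : t < cr.length := by
            by_contra h
            have : cr.drop t = [] := List.drop_eq_nil_of_le (by omega)
            simp [this] at hcd
          have hsd : sr.drop t ≠ [] := by
            have : t < sr.length := lt_of_lt_of_le htlt hlen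
            simp [List.drop_eq_nil_iff]; omega
          cases hsd2 : sr.drop t with
          | nil => exact absurd hsd2 hsd
          | cons s' sr'' =>
              have hcr'' : cr''.length ≤ n := by
                have := congrArg List.length hcd
                simp [List.length_drop] at this
                omega
              have hlen'' : cr''.length ≤ sr''.length := by
                have h1 := congrArg List.length hcd
                have h2 := congrArg List.length hsd2
                simp [List.length_drop] at h1 h2
                omega
              rw [ih cr'' sr'' s' c' hcr'' hlen'']; simp

-- ===== VERDICT (by name: the statement is the Claim_ definition above) =====
theorem group_sentences_by_token_count_py_spec : Claim_equal_group_sentences_by_token_count_py := by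
  intro sentences counts mx _
  unfold Spec_group_sentences_by_token_count_py
  rw [A_eq, B_eq]
  cases sentences with
  | nil => simp [pvSizesRec_nil, pvSplitRec]
  | cons s0 sr =>
      cases counts with
      | nil => simp [pvSizesRec_nil, pvSplitRec]
      | cons c0 cr =>
          simp only [List.zip_cons_cons, List.length_cons, List.take_succ_cons]
          rw [← zip_take_len sr cr]
          exact (split_sizes_eq_contA mx (cr.take sr.length).length (cr.take sr.length) sr s0 c0
                le_rfl (by simp)).symm
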